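-- pv_equiv track=rewrite | github.com/zhouwanqin310-tech/auto_reader | web/app.py | augment_topics_for_search
-- ===== SOURCE A (Python) =====
-- def expand_topics(topics):
--     """扩展主题短语，补充常见同义表达，减少漏检"""
--     alias_map = {
--         "linguistics in ai": [
--             "computational linguistics",
--             "ai for linguistics",
--             "linguistic analysis with ai",
--             "language technology"
--         ],
--         "corpus linguistics": [
--             "corpus-based linguistics",
--             "corpus analysis",
--             "linguistic corpora",
--             "corpus study"
--         ],
--         "ai-assisted language learning": [
--             "computer-assisted language learning",
--             "intelligent language tutoring",
--             "ai in language education",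
--             "technology-enhanced language learning"
--         ],
--         "language acquisition": [
--             "second language acquisition",
--             "first language acquisition",
--             "language development",
--             "language learning"
--         ],
--         "computational phonology": [
--             "phonological modeling",
--             "phonology in nlp",
--             "speech phonology",
--             "phonological analysis"
--         ],
--         "semantic analysis": [
--             "lexical semantics",
--             "semantic parsing",
--             "semantic representation",
--             "meaning representation"
--         ]
--     }
--
--     expanded = []
--     seen = set()
--     for topic in topics or []:
--         normalized = (topic or '').strip()
--         if not normalized:
--             continue
--
--         candidates = [normalized]
--         candidates.extend(alias_map.get(normalized.lower(), []))
--
--         for candidate in candidates: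
--             candidate = candidate.strip()
--             key = candidate.lower()
--             if candidate and key not in seen:
--                 seen.add(key)
--                 expanded.append(candidate)
--
--     return expanded
--
-- def augment_topics_for_search(topics, limit=20):
--     """将主题扩展为更丰富的检索词集合，提升并行检索召回。"""
--     expanded = expand_topics(topics or [])
--     if not expanded:
--         return []
--
--     enriched = []
--     seen = set()
--     for topic in expanded:
--         normalized = (topic or "").strip()
--         if not normalized:
--             continue
--
--         variants = [normalized]
--         lower = normalized.lower()
--
--         # 兼容 ArXiv/OpenAccess 对缩写和全称的不同命中表现
--         if lower == "ai":
--             variants.extend(["artificial intelligence", "machine intelligence"])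
--         if lower == "nlp":
--             variants.extend(["natural language processing", "computational linguistics"])
--         if lower == "llm":
--             variants.extend(["large language model", "large language models", "foundation model"])
--
--         # 对复数形式做兜底，减少因单复数差异导致的漏检
--         if len(lower) >= 4 and " " not in lower and not lower.endswith("s"):
--             variants.append(f"{normalized}s")
--
--         for variant in variants:
--             candidate = variant.strip()
--             key = candidate.lower()
--             if candidate and key not in seen:
--                 seen.add(key)
--                 enriched.append(candidate)
--                 if len(enriched) >= limit:
--                     return enriched
--
--     return enriched
-- ===== SOURCE B (Python) =====
-- ALIAS_MAP = {
--     "linguistics in ai": [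
--         "computational linguistics",
--         "ai for linguistics",
--         "linguistic analysis with ai",
--         "language technology",
--     ],
--     "corpus linguistics": [
--         "corpus-based linguistics",
--         "corpus analysis",
--         "linguistic corpora",
--         "corpus study",
--     ],
--     "ai-assisted language learning": [
--         "computer-assisted language learning",
--         "intelligent language tutoring",
--         "ai in language education",
--         "technology-enhanced language learning",
--     ],
--     "language acquisition": [
--         "second language acquisition",
--         "first language acquisition",
--         "language development",
--         "language learning",
--     ],
--     "computational phonology": [
--         "phonological modeling",
--         "phonology in nlp",
--         "speech phonology",
--         "phonological analysis",
--     ],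
--     "semantic analysis": [
--         "lexical semantics",
--         "semantic parsing",
--         "semantic representation",
--         "meaning representation",
--     ],
-- }
--
-- EXPANSIONS = {
--     "ai": ["artificial intelligence", "machine intelligence"],
--     "nlp": ["natural language processing", "computational linguistics"],
--     "llm": ["large language model", "large language models", "foundation model"],
-- }
--
--
-- def _variants(term):
--     """All search variants of one accepted term, in emission order."""
--     key = term.lower()
--     out = [term] + EXPANSIONS.get(key, [])
--     if len(key) >= 4 and " " not in key and not key.endswith("s"):
--         out.append(term + "s")
--     return out
--
--
-- def augment_topics_for_search(topics, limit=20):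
--     """Single streaming pass: expand each topic and enrich it immediately,
--     keeping two dedup sets (one per stage) and stopping as soon as `limit`
--     results have been produced."""
--     enriched = []
--     seen_terms = set()     # stage-1 dedup (expanded topic phrases)
--     seen_variants = set()  # stage-2 dedup (emitted search variants)
--     for topic in topics or []:
--         base = (topic or "").strip()
--         if not base:
--             continue
--         for cand in [base] + ALIAS_MAP.get(base.lower(), []):
--             term = cand.strip()
--             key = term.lower()
--             if not term or key in seen_terms:
--                 continue
--             seen_terms.add(key)
--             for variant in _variants(term):
--                 v = variant.strip()
--                 k = v.lower()
--                 if v and k not in seen_variants: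
--                     seen_variants.add(k)
--                     enriched.append(v)
--                     if len(enriched) >= limit:
--                         return enriched
--     return enriched
-- ===== Notes on version B (the rewrite author's own statement) =====
-- stated objective: alternative
-- what changed: Replaces A's two sequential passes (materialize the full expanded-topics list, then re-scan it to emit variants) with one fused streaming pass that expands each accepted topic and emits its variants immediately, keeping the two stage-local dedup sets and returning early at the limit without finishing the expansion.
import Mathlib
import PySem

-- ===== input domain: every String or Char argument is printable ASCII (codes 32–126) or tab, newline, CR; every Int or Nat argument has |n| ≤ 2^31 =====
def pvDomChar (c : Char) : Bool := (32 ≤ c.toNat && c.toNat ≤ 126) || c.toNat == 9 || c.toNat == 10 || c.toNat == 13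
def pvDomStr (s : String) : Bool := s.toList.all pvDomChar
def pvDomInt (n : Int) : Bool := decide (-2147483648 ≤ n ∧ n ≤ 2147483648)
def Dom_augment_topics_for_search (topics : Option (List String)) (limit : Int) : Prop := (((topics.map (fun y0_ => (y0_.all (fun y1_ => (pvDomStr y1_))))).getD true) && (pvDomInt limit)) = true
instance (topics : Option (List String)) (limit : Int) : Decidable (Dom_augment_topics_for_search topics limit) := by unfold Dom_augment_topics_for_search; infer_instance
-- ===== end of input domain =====

-- B fuses A's two sequential passes (expand all topics, then enrich the whole list) into one
-- streaming pass with the same two stage-local dedup sets and the same early exit at `limit`.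

-- ===== PORT A =====

-- alias_map of expand_topics
def pvAliasMapA : PySem.Dict String (List String) := PySem.Dict.ofList [
  ("linguistics in ai", ["computational linguistics", "ai for linguistics", "linguistic analysis with ai", "language technology"]),
  ("corpus linguistics", ["corpus-based linguistics", "corpus analysis", "linguistic corpora", "corpus study"]),
  ("ai-assisted language learning", ["computer-assisted language learning", "intelligent language tutoring", "ai in language education", "technology-enhanced language learning"]),
  ("language acquisition", ["second language acquisition", "first language acquisition", "language development", "language learning"]),
  ("computational phonology", ["phonological modeling", "phonology in nlp", "speech phonology", "phonological analysis"]),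
  ("semantic analysis", ["lexical semantics", "semantic parsing", "semantic representation", "meaning representation"])]

-- inner 'for candidate in candidates' loop of expand_topics
def pvACand : PySem.Set String → List String → List String → PySem.Set String × List String
  | seen, expanded, [] => (seen, expanded)
  | seen, expanded, cand :: rest =>
    let c := PySem.Str.strip cand
    let key := PySem.Str.lower c
    if c ≠ "" ∧ PySem.Set.contains seen key = false then
      pvACand (PySem.Set.add seen key) (expanded ++ [c]) rest
    else
      pvACand seen expanded rest

-- outer 'for topic in topics' loop of expand_topics
def pvAExpand : PySem.Set String → List String → List String → PySem.Set String × List String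
  | seen, expanded, [] => (seen, expanded)
  | seen, expanded, topic :: ts =>
    let normalized := PySem.Str.strip topic
    if normalized = "" then pvAExpand seen expanded ts
    else
      let cands := normalized :: PySem.Dict.getD pvAliasMapA (PySem.Str.lower normalized) []
      let st := pvACand seen expanded cands
      pvAExpand st.1 st.2 ts

-- the 'variants' list built by the if-chain in augment_topics_for_search
def pvAVariants (normalized : String) : List String :=
  let lower := PySem.Str.lower normalized
  let v1 := [normalized]
  let v2 := if lower = "ai" then v1 ++ ["artificial intelligence", "machine intelligence"] else v1
  let v3 := if lower = "nlp" then v2 ++ ["natural language processing", "computational linguistics"] else v2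
  let v4 := if lower = "llm" then v3 ++ ["large language model", "large language models", "foundation model"] else v3
  if 4 ≤ PySem.Str.len lower ∧ PySem.Str.isIn " " lower = false ∧ PySem.Str.endswith lower "s" = false then
    v4 ++ [String.ofList (normalized.toList ++ ['s'])]
  else v4

-- inner 'for variant in variants' loop (early 'return enriched' = .inr)
def pvAEmit (limit : Int) : PySem.Set String → List String → List String → (PySem.Set String × List String) ⊕ List String
  | seen, enriched, [] => .inl (seen, enriched)
  | seen, enriched, v :: vs =>
    let c := PySem.Str.strip v
    let key := PySem.Str.lower c
    if c ≠ "" ∧ PySem.Set.contains seen key = false then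
      let seen' := PySem.Set.add seen key
      let enriched' := enriched ++ [c]
      if limit ≤ (enriched'.length : Int) then .inr enriched'
      else pvAEmit limit seen' enriched' vs
    else pvAEmit limit seen enriched vs

-- outer 'for topic in expanded' loop of augment_topics_for_search
def pvAPhase2 (limit : Int) : PySem.Set String → List String → List String → List String
  | _, enriched, [] => enriched
  | seen, enriched, topic :: ts =>
    let normalized := PySem.Str.strip topic
    if normalized = "" then pvAPhase2 limit seen enriched ts
    else
      match pvAEmit limit seen enriched (pvAVariants normalized) with
      | .inr out => out
      | .inl st => pvAPhase2 limit st.1 st.2 ts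

def augment_topics_for_search (topics : Option (List String)) (limit : Int) : List String :=
  let expanded := (pvAExpand PySem.Set.empty [] (topics.getD [])).2
  if expanded = [] then []
  else pvAPhase2 limit PySem.Set.empty [] expanded

-- ===== PORT B =====

-- module constant ALIAS_MAP of Source B
def pvAliasMapB : PySem.Dict String (List String) := PySem.Dict.ofList [
  ("linguistics in ai", ["computational linguistics", "ai for linguistics", "linguistic analysis with ai", "language technology"]),
  ("corpus linguistics", ["corpus-based linguistics", "corpus analysis", "linguistic corpora", "corpus study"]),
  ("ai-assisted language learning", ["computer-assisted language learning", "intelligent language tutoring", "ai in language education", "technology-enhanced language learning"]),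
  ("language acquisition", ["second language acquisition", "first language acquisition", "language development", "language learning"]),
  ("computational phonology", ["phonological modeling", "phonology in nlp", "speech phonology", "phonological analysis"]),
  ("semantic analysis", ["lexical semantics", "semantic parsing", "semantic representation", "meaning representation"])]

-- module constant EXPANSIONS of Source B
def pvExpansions : PySem.Dict String (List String) := PySem.Dict.ofList [
  ("ai", ["artificial intelligence", "machine intelligence"]),
  ("nlp", ["natural language processing", "computational linguistics"]),
  ("llm", ["large language model", "large language models", "foundation model"])]

-- helper _variants of Source B
def pvBVariants (term : String) : List String :=
  let key := PySem.Str.lower term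
  let out := term :: PySem.Dict.getD pvExpansions key []
  if 4 ≤ PySem.Str.len key ∧ PySem.Str.isIn " " key = false ∧ PySem.Str.endswith key "s" = false then
    out ++ [String.ofList (term.toList ++ ['s'])]
  else out

-- innermost 'for variant in _variants(term)' loop of Source B (early return = .inr)
def pvBEmit (limit : Int) : PySem.Set String → List String → List String → (PySem.Set String × List String) ⊕ List String
  | seenV, enriched, [] => .inl (seenV, enriched)
  | seenV, enriched, variant :: vs =>
    let v := PySem.Str.strip variant
    let k := PySem.Str.lower v
    if v ≠ "" ∧ PySem.Set.contains seenV k = false then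
      let seenV' := PySem.Set.add seenV k
      let enriched' := enriched ++ [v]
      if limit ≤ (enriched'.length : Int) then .inr enriched'
      else pvBEmit limit seenV' enriched' vs
    else pvBEmit limit seenV enriched vs

-- middle 'for cand in [base] + ALIAS_MAP.get(...)' loop of Source B
def pvBCand (limit : Int) : PySem.Set String → PySem.Set String → List String → List String → (PySem.Set String × PySem.Set String × List String) ⊕ List String
  | seenT, seenV, enriched, [] => .inl (seenT, seenV, enriched)
  | seenT, seenV, enriched, cand :: rest =>
    let term := PySem.Str.strip cand
    let key := PySem.Str.lower term
    if term ≠ "" ∧ PySem.Set.contains seenT key = false then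
      match pvBEmit limit seenV enriched (pvBVariants term) with
      | .inr out => .inr out
      | .inl st => pvBCand limit (PySem.Set.add seenT key) st.1 st.2 rest
    else pvBCand limit seenT seenV enriched rest

-- outer 'for topic in topics or []' loop of Source B
def pvBLoop (limit : Int) : PySem.Set String → PySem.Set String → List String → List String → List String
  | _, _, enriched, [] => enriched
  | seenT, seenV, enriched, topic :: ts =>
    let base := PySem.Str.strip topic
    if base = "" then pvBLoop limit seenT seenV enriched ts
    else
      match pvBCand limit seenT seenV enriched (base :: PySem.Dict.getD pvAliasMapB (PySem.Str.lower base) []) with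
      | .inr out => out
      | .inl st => pvBLoop limit st.1 st.2.1 st.2.2 ts

def augment_topics_for_search_alt (topics : Option (List String)) (limit : Int) : List String :=
  pvBLoop limit PySem.Set.empty PySem.Set.empty [] (topics.getD [])

-- ===== PRECONDITION & SPEC =====
def Spec_augment_topics_for_search (topics : Option (List String)) (limit : Int) (out : List String) : Prop := out = augment_topics_for_search_alt topics limit
instance (topics : Option (List String)) (limit : Int) (out : List String) : Decidable (Spec_augment_topics_for_search topics limit out) := by unfold Spec_augment_topics_for_search; infer_instance

-- ===== CLAIM (what is proved, stated in full; the proofs are below) =====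
def Claim_equal_augment_topics_for_search : Prop := ∀ (topics : Option (List String)) (limit : Int), Dom_augment_topics_for_search topics limit → Spec_augment_topics_for_search topics limit (augment_topics_for_search topics limit)

-- ===== LEMMAS AND PROOFS =====

-- dropWhile is idempotent
theorem pv_dropWhile_idem {α : Type} (p : α → Bool) (l : List α) :
    (l.dropWhile p).dropWhile p = l.dropWhile p := by
  cases h : l.dropWhile p with
  | nil => simp
  | cons a t =>
    have hh := List.head?_dropWhile_not p l
    rw [h] at hh
    simp only [List.head?_cons] at hh
    rw [List.dropWhile_cons_of_neg (by simp [hh])]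

-- rstrip is idempotent
theorem pv_rstrip_idem (l : List Char) :
    PySem.Chars.rstrip (PySem.Chars.rstrip l) = PySem.Chars.rstrip l := by
  unfold PySem.Chars.rstrip
  rw [List.reverse_reverse, pv_dropWhile_idem]

-- lstrip does nothing after rstrip ∘ lstrip
theorem pv_lstrip_rstrip_lstrip (l : List Char) :
    PySem.Chars.lstrip (PySem.Chars.rstrip (PySem.Chars.lstrip l))
      = PySem.Chars.rstrip (PySem.Chars.lstrip l) := by
  unfold PySem.Chars.rstrip PySem.Chars.lstrip
  set p := PySem.Chars.isspace with hp
  obtain ⟨r, hr⟩ := List.dropWhile_suffix (l := (l.dropWhile p).reverse) p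
  cases hs : ((l.dropWhile p).reverse.dropWhile p).reverse with
  | nil => rfl
  | cons a t =>
    have hu2 : l.dropWhile p = a :: (t ++ r.reverse) := by
      have h0 : l.dropWhile p = ((l.dropWhile p).reverse.dropWhile p).reverse ++ r.reverse := by
        rw [← List.reverse_append, hr, List.reverse_reverse]
      rw [h0, hs]; simp
    have hpa : p a = false := by
      have hh := List.head?_dropWhile_not p l
      rw [hu2] at hh
      simpa using hh
    exact List.dropWhile_cons_of_neg (by simp [hpa])

-- strip is idempotent (List Char level)
theorem pv_chars_strip_idem (l : List Char) :
    PySem.Chars.strip (PySem.Chars.strip l) = PySem.Chars.strip l := by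
  unfold PySem.Chars.strip
  rw [pv_lstrip_rstrip_lstrip l, pv_rstrip_idem]

-- strip is idempotent (String level)
theorem pv_strip_idem (s : String) :
    PySem.Str.strip (PySem.Str.strip s) = PySem.Str.strip s := by
  simp [PySem.Str.strip, pv_chars_strip_idem]

-- the two alias tables are the same
theorem pv_alias_eq : pvAliasMapB = pvAliasMapA := rfl

-- the items of B's EXPANSIONS dict, as a literal
theorem pv_exp_items : pvExpansions.items =
    [("ai", ["artificial intelligence", "machine intelligence"]),
     ("nlp", ["natural language processing", "computational linguistics"]),
     ("llm", ["large language model", "large language models", "foundation model"])] := by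
  decide

-- B's variant list equals A's variant list
theorem pv_variants_eq (n : String) : pvBVariants n = pvAVariants n := by
  unfold pvBVariants pvAVariants
  simp only [PySem.Dict.getD, PySem.Dict.get?]
  rw [pv_exp_items]
  rcases eq_or_ne (PySem.Str.lower n) "ai" with h1 | h1
  · rw [h1]; simp [List.find?]
  rcases eq_or_ne (PySem.Str.lower n) "nlp" with h2 | h2
  · rw [h2]; simp [List.find?]
  rcases eq_or_ne (PySem.Str.lower n) "llm" with h3 | h3
  · rw [h3]; simp [List.find?]
  · have e1 : (("ai" : String) == PySem.Str.lower n) = false := beq_eq_false_iff_ne.mpr (Ne.symm h1)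
    have e2 : (("nlp" : String) == PySem.Str.lower n) = false := beq_eq_false_iff_ne.mpr (Ne.symm h2)
    have e3 : (("llm" : String) == PySem.Str.lower n) = false := beq_eq_false_iff_ne.mpr (Ne.symm h3)
    simp [List.find?, e1, e2, e3, h1, h2, h3]

-- the two emit loops are the same function
theorem pv_emit_eq (limit : Int) (s : PySem.Set String) (e : List String) (vs : List String) :
    pvBEmit limit s e vs = pvAEmit limit s e vs := by
  induction vs generalizing s e with
  | nil => rfl
  | cons v vs ih =>
    simp only [pvBEmit, pvAEmit]
    split_ifs with h1 h2
    · rfl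
    · exact ih _ _
    · exact ih _ _

-- pvACand appends to its accumulator
theorem pv_acand_acc (cands : List String) (seen : PySem.Set String) (expanded : List String) :
    pvACand seen expanded cands
      = ((pvACand seen [] cands).1, expanded ++ (pvACand seen [] cands).2) := by
  induction cands generalizing seen expanded with
  | nil => simp [pvACand]
  | cons c rest ih =>
    simp only [pvACand]
    split_ifs with h
    · simp only [List.nil_append]
      rw [ih _ (expanded ++ [PySem.Str.strip c]), ih _ [PySem.Str.strip c]]
      simp
    · exact ih _ _

-- pvAExpand appends to its accumulator
theorem pv_aexpand_acc (ts : List String) (seen : PySem.Set String) (expanded : List String) :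
    pvAExpand seen expanded ts
      = ((pvAExpand seen [] ts).1, expanded ++ (pvAExpand seen [] ts).2) := by
  induction ts generalizing seen expanded with
  | nil => simp [pvAExpand]
  | cons t rest ih =>
    simp only [pvAExpand]
    split_ifs with h
    · exact ih _ _
    · set cds := PySem.Str.strip t :: pvAliasMapA.getD (PySem.Str.lower (PySem.Str.strip t)) [] with hcds
      rw [pv_acand_acc cds seen expanded, pv_acand_acc cds seen []]
      dsimp only
      simp only [List.nil_append]
      rw [ih ((pvACand seen [] cds).1) (expanded ++ (pvACand seen [] cds).2),
          ih ((pvACand seen [] cds).1) ((pvACand seen [] cds).2)]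
      simp

-- proof-side Sum-valued version of pvAPhase2 (state after a partial run)
def pvAPhase2Go (limit : Int) : PySem.Set String → List String → List String → (PySem.Set String × List String) ⊕ List String
  | seen, enriched, [] => .inl (seen, enriched)
  | seen, enriched, topic :: ts =>
    let normalized := PySem.Str.strip topic
    if normalized = "" then pvAPhase2Go limit seen enriched ts
    else
      match pvAEmit limit seen enriched (pvAVariants normalized) with
      | .inr out => .inr out
      | .inl st => pvAPhase2Go limit st.1 st.2 ts

-- splitting pvAPhase2 across an append
theorem pv_phase2_split (limit : Int) (xs ys : List String) (s : PySem.Set String) (e : List String) :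
    pvAPhase2 limit s e (xs ++ ys)
      = (match pvAPhase2Go limit s e xs with
         | .inr out => out
         | .inl st => pvAPhase2 limit st.1 st.2 ys) := by
  induction xs generalizing s e with
  | nil => simp [pvAPhase2Go]
  | cons x xs ih =>
    simp only [List.cons_append, pvAPhase2, pvAPhase2Go]
    split_ifs with h
    · exact ih _ _
    · cases pvAEmit limit s e (pvAVariants (PySem.Str.strip x)) with
      | inr out => rfl
      | inl st => exact ih _ _

set_option maxHeartbeats 1000000 in
-- A's phase-2 run over one topic's candidate chunk equals B's fused candidate loop
theorem pv_chunk (limit : Int) (cands : List String) (s1 s2 : PySem.Set String) (e : List String) :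
    pvBCand limit s1 s2 e cands
      = (match pvAPhase2Go limit s2 e (pvACand s1 [] cands).2 with
         | .inr out => .inr out
         | .inl st => .inl ((pvACand s1 [] cands).1, st.1, st.2)) := by
  induction cands generalizing s1 s2 e with
  | nil => rfl
  | cons cand rest ih =>
    simp only [pvBCand, pvACand]
    split_ifs with h
    · -- accepted candidate
      simp only [List.nil_append]
      rw [pv_acand_acc rest _ [PySem.Str.strip cand]]
      dsimp only
      simp only [List.singleton_append]
      simp only [pvAPhase2Go]
      rw [pv_strip_idem, if_neg h.1, pv_variants_eq, pv_emit_eq]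
      cases hE : pvAEmit limit s2 e (pvAVariants (PySem.Str.strip cand)) with
      | inr out => rfl
      | inl st =>
        dsimp only
        exact ih _ _ _
    · exact ih _ _ _

set_option maxHeartbeats 1000000 in
-- main fusion lemma: A's expand-then-enrich equals B's single pass, from any state
theorem pv_main (limit : Int) (ts : List String) (s1 s2 : PySem.Set String) (e : List String) :
    pvAPhase2 limit s2 e (pvAExpand s1 [] ts).2 = pvBLoop limit s1 s2 e ts := by
  induction ts generalizing s1 s2 e with
  | nil => simp [pvAExpand, pvAPhase2, pvBLoop]
  | cons t rest ih =>
    rw [show pvBLoop limit s1 s2 e (t :: rest)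
          = (if PySem.Str.strip t = "" then pvBLoop limit s1 s2 e rest
             else match pvBCand limit s1 s2 e (PySem.Str.strip t :: pvAliasMapB.getD (PySem.Str.lower (PySem.Str.strip t)) []) with
               | .inr out => out
               | .inl st => pvBLoop limit st.1 st.2.1 st.2.2 rest) from rfl,
        show pvAExpand s1 [] (t :: rest)
          = (if PySem.Str.strip t = "" then pvAExpand s1 [] rest
             else pvAExpand (pvACand s1 [] (PySem.Str.strip t :: pvAliasMapA.getD (PySem.Str.lower (PySem.Str.strip t)) [])).1
                  (pvACand s1 [] (PySem.Str.strip t :: pvAliasMapA.getD (PySem.Str.lower (PySem.Str.strip t)) [])).2 rest) from rfl,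
        pv_alias_eq]
    split_ifs with h
    · exact ih _ _ _
    · set cds := PySem.Str.strip t :: pvAliasMapA.getD (PySem.Str.lower (PySem.Str.strip t)) [] with hcds
      rw [pv_aexpand_acc rest ((pvACand s1 [] cds).1) ((pvACand s1 [] cds).2)]
      dsimp only
      rw [pv_phase2_split, pv_chunk]
      generalize pvACand s1 [] cds = P
      cases hA : pvAPhase2Go limit s2 e P.2 with
      | inr out => rfl
      | inl st => exact ih P.1 st.1 st.2

-- ===== VERDICT (by name: the statement is the Claim_ definition above) =====
theorem augment_topics_for_search_spec : Claim_equal_augment_topics_for_search := by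
  intro topics limit _
  unfold Spec_augment_topics_for_search augment_topics_for_search_alt
  rw [show augment_topics_for_search topics limit
        = (if (pvAExpand PySem.Set.empty [] (topics.getD [])).2 = [] then []
           else pvAPhase2 limit PySem.Set.empty [] (pvAExpand PySem.Set.empty [] (topics.getD [])).2) from rfl]
  rw [← pv_main]
  split_ifs with h
  · rw [h]; rfl
  · rfl
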